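-- pv_equiv track=rewrite | github.com/sadeslandes/AdventOfCode | aoc/aoc2020/day14/day14.py | apply_mask_to_addr
-- ===== SOURCE A (Python) =====
-- def apply_mask_to_addr(mask, addr):
--     addr = f"{addr:036b}"
--     for i, c in enumerate(mask):
--         if c == "1" or c == "X":
--             addr = addr[:i] + c + addr[i + 1:]
--
--     def _generate_permutations(string):
--         if string.count("X") == 0:
--             yield int(string, 2)
--         else:
--             yield from _generate_permutations(string.replace("X", "0", 1))
--             yield from _generate_permutations(string.replace("X", "1", 1))
--
--     return _generate_permutations(addr)
-- ===== SOURCE B (Python) =====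
-- def apply_mask_to_addr(mask, addr):
--     s = list(f"{addr:036b}")
--     for i, c in enumerate(mask):
--         if c == "1" or c == "X":
--             s[i] = c
--     xs = [i for i, c in enumerate(s) if c == "X"]
--     k = len(xs)
--     for n in range(1 << k):
--         t = list(s)
--         for j, i in enumerate(xs):
--             t[i] = "01"[(n >> (k - 1 - j)) & 1]
--         yield int("".join(t), 2)
-- ===== Notes on version B (the rewrite author's own statement) =====
-- stated objective: alternative
-- what changed: A enumerates floating-bit permutations by recursively replacing the first 'X' with '0' then '1' (re-scanning and re-copying the string at every level); B records the X positions once and counts n through range(2**k), filling the bits of n straight into those positions, so the recursion disappears. Pre_ excludes masks with a '1' or 'X' at an index past the end of the 36-character address string, where A's string-slice concatenation silently appends the character while B's in-place list assignment raises IndexError.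
-- outside the precondition, e.g. on apply_mask_to_addr('000000000000000000000000000000000000X', 0): A returns [0, 1], B raises IndexError
import Mathlib
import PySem

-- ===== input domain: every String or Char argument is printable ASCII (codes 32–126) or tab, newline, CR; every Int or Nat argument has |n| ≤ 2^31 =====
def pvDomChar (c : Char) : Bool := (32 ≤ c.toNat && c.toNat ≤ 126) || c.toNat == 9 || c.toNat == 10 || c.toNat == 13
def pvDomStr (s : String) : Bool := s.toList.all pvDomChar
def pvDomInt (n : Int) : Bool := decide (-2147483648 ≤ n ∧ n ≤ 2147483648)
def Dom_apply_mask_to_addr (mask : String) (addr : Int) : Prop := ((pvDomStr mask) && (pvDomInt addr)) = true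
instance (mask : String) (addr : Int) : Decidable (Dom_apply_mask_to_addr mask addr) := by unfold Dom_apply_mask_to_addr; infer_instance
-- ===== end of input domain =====

-- B replaces A's recursive first-'X' substitution with a single pass that records the X
-- positions and counts n through range(2**k), filling the bits of n into those positions
-- (same masked string, same yield order); objective: alternative algorithm, not timed faster.

-- ===== PORT A =====
-- f"{addr:036b}" (shared by both Pythons): signed binary, zero-padded to a minimum
-- total width of 36 (the '-' sign counts toward the width). Hand-ported (no PySem format).
def pvFmt036 (addr : Int) : List Char :=
  let digits := Nat.toDigits 2 addr.natAbs
  if addr < 0 then '-' :: (List.replicate (35 - digits.length) '0' ++ digits)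
  else List.replicate (36 - digits.length) '0' ++ digits

-- int(string, 2) (shared). On every string either program reads, the parse succeeds
-- (an optional leading '-' followed by binary digits), so the getD default is never used.
def pvInt2 (cs : List Char) : Int := (PySem.Int.ofCharsBase? cs 2).getD 0

-- string.replace("X", c, 1): count-limited replace (not a PySem primitive), hand-ported:
-- replace only the FIRST occurrence of 'X'.
def pvReplX (c : Char) : List Char → List Char
  | [] => []
  | a :: t => if a = 'X' then c :: t else a :: pvReplX c t

-- needed by the termination argument of pvGenPerms (cited in decreasing_by)
theorem pvReplX_count_lt (c : Char) (hc : c ≠ 'X') :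
    ∀ s : List Char, s.count 'X' ≠ 0 → (pvReplX c s).count 'X' < s.count 'X' := by
  intro s hs
  induction s with
  | nil => simp at hs
  | cons a t ih =>
    by_cases ha : a = 'X'
    · subst ha; simp [pvReplX, hc]
    · simp [pvReplX, ha] at *
      omega

-- the masking loop of A: addr = addr[:i] + c + addr[i+1:] for '1'/'X' mask chars
-- (string.count("X") below: a 1-character needle, so substring count = List.count)
def pvMaskA (mask : List Char) (addr : Int) : List Char :=
  (PySem.List.enumerate mask).foldl
    (fun s ic =>
      if ic.2 = '1' ∨ ic.2 = 'X' then
        PySem.List.slice s none (some ic.1) ++ [ic.2] ++ PySem.List.slice s (some (ic.1 + 1)) none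
      else s)
    (pvFmt036 addr)

-- _generate_permutations, yields collected into a list in yield order
def pvGenPerms (s : List Char) : List Int :=
  if h : s.count 'X' = 0 then [pvInt2 s]
  else pvGenPerms (pvReplX '0' s) ++ pvGenPerms (pvReplX '1' s)
termination_by s.count 'X'
decreasing_by
  · exact pvReplX_count_lt '0' (by decide) s h
  · exact pvReplX_count_lt '1' (by decide) s h

def apply_mask_to_addr (mask : String) (addr : Int) : List Int :=
  pvGenPerms (pvMaskA mask.toList addr)

-- ===== PORT B =====
-- s[i] = c on the list (raises IndexError out of range; Pre_ keeps every assigned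
-- index inside the 36-character string, where List.set is exact)
def pvMaskB (mask : List Char) (addr : Int) : List Char :=
  (PySem.List.enumerate mask).foldl
    (fun s ic => if ic.2 = '1' ∨ ic.2 = 'X' then s.set ic.1.toNat ic.2 else s)
    (pvFmt036 addr)

-- xs = [i for i, c in enumerate(s) if c == "X"]
def pvXidx (s : List Char) : List Int :=
  (PySem.List.enumerate s).filterMap (fun ic => if ic.2 = 'X' then some ic.1 else none)

-- "01"[(n >> t) & 1]
def pvBitC (n t : Nat) : Char := if (n >>> t) &&& 1 = 1 then '1' else '0'

-- the inner loop: for j, i in enumerate(xs): t[i] = "01"[(n >> (k-1-j)) & 1]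
-- (every i here is an in-range X position of s, so List.set is exact)
def pvFill (s : List Char) (xs : List Int) (k n : Nat) : List Char :=
  (PySem.List.enumerate xs).foldl
    (fun t ji => t.set ji.2.toNat (pvBitC n (k - 1 - ji.1.toNat))) s

def apply_mask_to_addr_alt (mask : String) (addr : Int) : List Int :=
  let s := pvMaskB mask.toList addr
  let xs := pvXidx s
  let k := xs.length
  (List.range (1 <<< k)).map (fun n => pvInt2 (pvFill s xs k n))

-- ===== PRECONDITION & SPEC =====
-- Pre_ excludes masks with a '1' or 'X' at an index ≥ 36 (past the end of the
-- 36-character address string): there A's string-slice concatenation silently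
-- appends the character while B's in-place list assignment raises IndexError.
def Pre_apply_mask_to_addr (mask : String) (addr : Int) : Prop :=
  (mask.toList.drop 36).all (fun c => !(c == '1' || c == 'X')) = true
instance (mask : String) (addr : Int) : Decidable (Pre_apply_mask_to_addr mask addr) := by unfold Pre_apply_mask_to_addr; infer_instance

def pvWitness_apply_mask_to_addr : String × Int := ("X0X1", 5)

def Spec_apply_mask_to_addr (mask : String) (addr : Int) (out : List Int) : Prop := out = apply_mask_to_addr_alt mask addr
instance (mask : String) (addr : Int) (out : List Int) : Decidable (Spec_apply_mask_to_addr mask addr out) := by unfold Spec_apply_mask_to_addr; infer_instance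

-- ===== CLAIM (what is proved, stated in full; the proofs are below) =====
def Claim_equal_apply_mask_to_addr : Prop := ∀ (mask : String) (addr : Int), Dom_apply_mask_to_addr mask addr → Pre_apply_mask_to_addr mask addr → Spec_apply_mask_to_addr mask addr (apply_mask_to_addr mask addr)

-- ===== LEMMAS AND PROOFS =====

-- pvXidx generalized to an arbitrary enumeration start (proof helper)
def pvXidxF (s : List Char) (st : Int) : List Int :=
  (PySem.List.enumerate s st).filterMap (fun ic => if ic.2 = 'X' then some ic.1 else none)

-- substitute the bits of n (width k, MSB first) for the 'X's of s, the j-th X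
-- (0-based, counting from the start of the original string) receiving bit (k-1-j)
def pvSubst (k n : Nat) : Nat → List Char → List Char
  | _, [] => []
  | j, a :: t => if a = 'X' then pvBitC n (k - 1 - j) :: pvSubst k n (j + 1) t
                 else a :: pvSubst k n j t

-- the formatted address string is at least 36 characters long
theorem pvFmt036_length (addr : Int) : 36 ≤ (pvFmt036 addr).length := by
  unfold pvFmt036
  split <;> simp <;> omega

-- A's slice splice at an in-range index is List.set
theorem pvMask_step (s : List Char) (st : Nat) (c : Char) (h : st < s.length) :
    PySem.List.slice s none (some (st : Int)) ++ [c] ++ PySem.List.slice s (some ((st : Int) + 1)) none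
      = s.set st c := by
  have h1 : ((st : Int) + 1) = ((st + 1 : Nat) : Int) := by push_cast; ring
  rw [PySem.List.slice_to_natCast, h1, PySem.List.slice_from_natCast]
  simp [List.set_eq_take_append_cons_drop, h]

-- both masking loops build the same string while every active index stays in range
theorem pvMask_fold_eq (l : List Char) : ∀ (st : Nat) (s : List Char),
    36 ≤ s.length →
    (∀ c ∈ l.drop (36 - st), ¬(c = '1' ∨ c = 'X')) →
    (PySem.List.enumerate l (st : Int)).foldl
      (fun s ic =>
        if ic.2 = '1' ∨ ic.2 = 'X' then
          PySem.List.slice s none (some ic.1) ++ [ic.2] ++ PySem.List.slice s (some (ic.1 + 1)) none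
        else s) s
    = (PySem.List.enumerate l (st : Int)).foldl
        (fun s ic => if ic.2 = '1' ∨ ic.2 = 'X' then s.set ic.1.toNat ic.2 else s) s := by
  induction l with
  | nil => intro st s _ _; rfl
  | cons a t ih =>
    intro st s hs hpre
    rw [PySem.List.enumerate_cons, List.foldl_cons, List.foldl_cons]
    have hst : ((st : Int) + 1) = ((st + 1 : Nat) : Int) := by push_cast; ring
    have hpre' : ∀ c ∈ t.drop (36 - (st + 1)), ¬(c = '1' ∨ c = 'X') := by
      intro c hc
      by_cases h36 : st < 36
      · exact hpre c (by
          have : (a :: t).drop (36 - st) = t.drop (36 - (st + 1)) := by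
            have : 36 - st = (36 - (st + 1)) + 1 := by omega
            simp [this]
          rw [this]; exact hc)
      · exact hpre c (by
          have : 36 - st = 0 := by omega
          rw [this]
          exact List.mem_cons_of_mem a (List.mem_of_mem_drop hc))
    by_cases h : a = '1' ∨ a = 'X'
    · have h36 : st < 36 := by
        by_contra hge
        exact hpre a (by
          have : 36 - st = 0 := by omega
          rw [this]; exact List.mem_cons_self) h
      have hin : st < s.length := by omega
      simp only [h, if_pos]
      rw [pvMask_step s st a hin, hst]
      have : ((st : Int)).toNat = st := by simp
      rw [this] at *
      exact ih (st + 1) (s.set st a) (by simpa using hs) hpre'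
    · simp only [h, if_neg, not_false_iff]
      rw [hst]
      exact ih (st + 1) s hs hpre'

theorem pvMask_eq (mask : List Char) (addr : Int)
    (hpre : ∀ c ∈ mask.drop 36, ¬(c = '1' ∨ c = 'X')) :
    pvMaskA mask addr = pvMaskB mask addr := by
  unfold pvMaskA pvMaskB
  rw [show PySem.List.enumerate mask = PySem.List.enumerate mask ((0 : Nat) : Int) from rfl]
  exact pvMask_fold_eq mask 0 (pvFmt036 addr) (pvFmt036_length addr) (by simpa using hpre)

-- length of the X-index list is the X count
theorem pvXidxF_length (s : List Char) : ∀ st : Int, (pvXidxF s st).length = s.count 'X' := by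
  induction s with
  | nil => intro st; rfl
  | cons a t ih =>
    intro st
    by_cases ha : a = 'X'
    · subst ha; simp [pvXidxF, PySem.List.enumerate_cons] at *; rw [ih]
    · simp [pvXidxF, PySem.List.enumerate_cons, ha] at *; rw [ih]

theorem pvXidx_eq (s : List Char) : pvXidx s = pvXidxF s 0 := rfl

-- the fill loop IS pvSubst (generalized over a prefix p already in place)
theorem pvFill_gen (k n : Nat) : ∀ (s p : List Char) (j : Nat),
    (PySem.List.enumerate (pvXidxF s (p.length : Int)) (j : Int)).foldl
      (fun t ji => t.set ji.2.toNat (pvBitC n (k - 1 - ji.1.toNat))) (p ++ s)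
    = p ++ pvSubst k n j s := by
  intro s
  induction s with
  | nil => intro p j; simp [pvXidxF, pvSubst, PySem.List.enumerate_nil]
  | cons a t ih =>
    intro p j
    by_cases ha : a = 'X'
    · subst ha
      have hx : pvXidxF ('X' :: t) (p.length : Int) = (p.length : Int) :: pvXidxF t ((p.length : Int) + 1) := by
        simp [pvXidxF, PySem.List.enumerate_cons]
      rw [hx, PySem.List.enumerate_cons, List.foldl_cons]
      have hset : (p ++ 'X' :: t).set ((p.length : Int)).toNat (pvBitC n (k - 1 - ((j : Int)).toNat))
          = p ++ pvBitC n (k - 1 - j) :: t := by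
        simp
      rw [hset]
      have hlen : ((p.length : Int) + 1) = (((p ++ [pvBitC n (k - 1 - j)]).length : Nat) : Int) := by
        simp
      have hj : ((j : Int) + 1) = ((j + 1 : Nat) : Int) := by push_cast; ring
      rw [hlen, hj]
      have := ih (p ++ [pvBitC n (k - 1 - j)]) (j + 1)
      rw [List.append_assoc] at this
      simp only [List.singleton_append] at this
      rw [this]
      simp [pvSubst]
    · have hx : pvXidxF (a :: t) (p.length : Int) = pvXidxF t ((p.length : Int) + 1) := by
        simp [pvXidxF, PySem.List.enumerate_cons, ha]
      rw [hx]
      have hlen : ((p.length : Int) + 1) = (((p ++ [a]).length : Nat) : Int) := by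
        simp
      rw [hlen]
      have := ih (p ++ [a]) j
      rw [List.append_assoc] at this
      simp only [List.singleton_append] at this
      rw [this]
      simp [pvSubst, ha]

-- no X: substitution is the identity
theorem pvSubst_nox (k n : Nat) : ∀ (s : List Char) (j : Nat), s.count 'X' = 0 → pvSubst k n j s = s := by
  intro s
  induction s with
  | nil => intro j _; rfl
  | cons a t ih =>
    intro j h
    simp [List.count_cons] at h
    have ha : ¬ a = 'X' := by
      intro hh; subst hh; simp at h
    simp [pvSubst, ha, ih j (by omega)]

-- replacing the first X lowers the count by exactly one
theorem pvReplX_count (c : Char) (hc : c ≠ 'X') :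
    ∀ s : List Char, s.count 'X' ≠ 0 → (pvReplX c s).count 'X' = s.count 'X' - 1 := by
  intro s
  induction s with
  | nil => simp
  | cons a t ih =>
    intro h
    by_cases ha : a = 'X'
    · subst ha; simp [pvReplX, hc]
    · simp [pvReplX, ha] at *
      omega

-- bit lemmas
theorem pvBitC_low (k n t : Nat) (ht : t < k) : pvBitC (2 ^ k + n) t = pvBitC n t := by
  unfold pvBitC
  have h2 : 2 ^ k = 2 ^ t * 2 ^ (k - t) := by
    rw [← pow_add]; congr 1; omega
  have hsr : (2 ^ k + n) >>> t = 2 ^ (k - t) + n >>> t := by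
    rw [Nat.shiftRight_eq_div_pow, Nat.shiftRight_eq_div_pow, h2,
      Nat.mul_add_div (Nat.two_pow_pos t)]
  rw [hsr]
  have heven : 2 ^ (k - t) % 2 = 0 := by
    have hd : (2 : Nat) ∣ 2 ^ (k - t) := dvd_pow_self 2 (by omega)
    omega
  have hmod : (2 ^ (k - t) + n >>> t) % 2 = (n >>> t) % 2 := by omega
  simp only [Nat.and_one_is_mod, hmod]

theorem pvBitC_top_zero (k n : Nat) (hn : n < 2 ^ k) : pvBitC n k = '0' := by
  unfold pvBitC
  rw [Nat.shiftRight_eq_div_pow, Nat.div_eq_of_lt hn]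
  simp

theorem pvBitC_top_one (k n : Nat) (hn : n < 2 ^ k) : pvBitC (2 ^ k + n) k = '1' := by
  unfold pvBitC
  rw [Nat.shiftRight_eq_div_pow]
  have : (2 ^ k + n) / 2 ^ k = 1 := by
    rw [Nat.add_div_left _ (by positivity), Nat.div_eq_of_lt hn]
  rw [this]
  simp

-- index shift: width k+1 at position j+1 is width k at position j (same n)
theorem pvSubst_shift (k n : Nat) : ∀ (t : List Char) (j : Nat),
    pvSubst (k + 1) n (j + 1) t = pvSubst k n j t := by
  intro t
  induction t with
  | nil => intro j; rfl
  | cons a u ih =>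
    intro j
    by_cases ha : a = 'X'
    · subst ha
      simp only [pvSubst]
      have harg : k + 1 - 1 - (j + 1) = k - 1 - j := by omega
      rw [harg, ih (j + 1)]
      simp
    · simp [pvSubst, ha, ih j]

-- same, for n shifted by 2^k (needs the count bound so low bits stay below k)
theorem pvSubst_shift_hi (k n : Nat) : ∀ (t : List Char) (j : Nat),
    t.count 'X' + j ≤ k → pvSubst (k + 1) (2 ^ k + n) (j + 1) t = pvSubst k n j t := by
  intro t
  induction t with
  | nil => intro j _; rfl
  | cons a u ih =>
    intro j hcnt
    by_cases ha : a = 'X'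
    · subst ha
      simp at hcnt
      simp only [pvSubst]
      have h1 : k + 1 - 1 - (j + 1) = k - 1 - j := by omega
      rw [h1, pvBitC_low k n (k - 1 - j) (by omega), ih (j + 1) (by omega)]
      simp
    · simp only [pvSubst, if_neg ha]
      have hcnt' : u.count 'X' + j ≤ k := by
        simp [ha] at hcnt; omega
      rw [ih j hcnt']

-- splitting the substitution at the first X: the '0' branch
theorem pvSubst_repl0 (k n : Nat) (hn : n < 2 ^ k) :
    ∀ s : List Char, s.count 'X' = k + 1 →
      pvSubst (k + 1) n 0 s = pvSubst k n 0 (pvReplX '0' s) := by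
  intro s
  induction s with
  | nil => intro h; simp at h
  | cons a t ih =>
    intro h
    by_cases ha : a = 'X'
    · subst ha
      simp only [pvSubst, pvReplX]
      rw [pvSubst_shift k n t 0]
      have hb : pvBitC n (k + 1 - 1 - 0) = '0' := by
        simpa using pvBitC_top_zero k n hn
      rw [hb]
      simp [pvSubst]
    · simp only [pvSubst, pvReplX, if_neg ha]
      rw [ih (by simpa [List.count_cons, ha] using h)]

-- and the '1' branch (bit 2^k set)
theorem pvSubst_repl1 (k n : Nat) (hn : n < 2 ^ k) :
    ∀ s : List Char, s.count 'X' = k + 1 →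
      pvSubst (k + 1) (2 ^ k + n) 0 s = pvSubst k n 0 (pvReplX '1' s) := by
  intro s
  induction s with
  | nil => intro h; simp at h
  | cons a t ih =>
    intro h
    by_cases ha : a = 'X'
    · subst ha
      simp only [pvSubst, pvReplX]
      have hcnt : t.count 'X' = k := by simp at h; omega
      rw [pvSubst_shift_hi k n t 0 (by omega)]
      have hb : pvBitC (2 ^ k + n) (k + 1 - 1 - 0) = '1' := by
        simpa using pvBitC_top_one k n hn
      rw [hb]
      simp [pvSubst]
    · simp only [pvSubst, pvReplX, if_neg ha]
      rw [ih (by simpa [List.count_cons, ha] using h)]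

-- the heart: A's recursion = map of pvSubst over range (2^k)
theorem pvGen_eq_subst : ∀ (k : Nat) (s : List Char), s.count 'X' = k →
    pvGenPerms s = (List.range (2 ^ k)).map (fun n => pvInt2 (pvSubst k n 0 s)) := by
  intro k
  induction k with
  | zero =>
    intro s h
    rw [pvGenPerms, dif_pos h]
    simp [pvSubst_nox 0 0 s 0 h]
  | succ k ih =>
    intro s h
    rw [pvGenPerms, dif_neg (by omega)]
    have h0 : (pvReplX '0' s).count 'X' = k := by
      rw [pvReplX_count '0' (by decide) s (by omega)]; omega
    have h1 : (pvReplX '1' s).count 'X' = k := by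
      rw [pvReplX_count '1' (by decide) s (by omega)]; omega
    rw [ih _ h0, ih _ h1]
    have hsplit : (2 : Nat) ^ (k + 1) = 2 ^ k + 2 ^ k := by ring
    rw [hsplit, List.range_add, List.map_append, List.map_map]
    congr 1
    · apply List.map_congr_left
      intro n hn
      rw [List.mem_range] at hn
      rw [← pvSubst_repl0 k n hn s h]
    · apply List.map_congr_left
      intro n hn
      rw [List.mem_range] at hn
      simp only [Function.comp_apply]
      rw [← pvSubst_repl1 k n hn s h]

-- B's fill loop from the real starting point
theorem pvFill_eq_subst (s : List Char) (k n : Nat) :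
    pvFill s (pvXidx s) k n = pvSubst k n 0 s := by
  have := pvFill_gen k n s [] 0
  simpa [pvFill, pvXidx_eq, pvXidxF] using this

-- ===== VERDICT (by name: the statement is the Claim_ definition above) =====
theorem apply_mask_to_addr_spec : Claim_equal_apply_mask_to_addr := by
  intro mask addr _ hpre
  have hpre' : ∀ c ∈ mask.toList.drop 36, ¬(c = '1' ∨ c = 'X') := by
    intro c hc
    have h := List.all_eq_true.mp hpre c hc
    simp at h
    tauto
  unfold Spec_apply_mask_to_addr apply_mask_to_addr apply_mask_to_addr_alt
  rw [pvMask_eq mask.toList addr hpre']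
  show pvGenPerms (pvMaskB mask.toList addr)
      = (List.range (1 <<< (pvXidx (pvMaskB mask.toList addr)).length)).map
          (fun n => pvInt2 (pvFill (pvMaskB mask.toList addr) (pvXidx (pvMaskB mask.toList addr))
            (pvXidx (pvMaskB mask.toList addr)).length n))
  generalize pvMaskB mask.toList addr = s
  have hk : (pvXidx s).length = s.count 'X' := by
    rw [pvXidx_eq]; exact pvXidxF_length s 0
  rw [pvGen_eq_subst (s.count 'X') s rfl]
  have hpow : 1 <<< (pvXidx s).length = 2 ^ (s.count 'X') := by
    rw [Nat.shiftLeft_eq, one_mul, hk]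
  rw [hpow]
  apply List.map_congr_left
  intro n _
  rw [pvFill_eq_subst s ((pvXidx s).length) n, hk]
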